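-- pv_equiv track=rewrite | github.com/liamtlr/advent-of-code | day-08/solution.py | get_input_data_by_sector_count
-- ===== SOURCE A (Python) =====
-- from typing import Dict, List
--
-- def get_input_data_by_sector_count(
--
--         input_data: List[str]
-- ) -> Dict[int, set]:
--     """Group the readings by a count of its segments."""
--     output_dict: dict = {}
--     for reading in input_data:
--         segments = len(reading)
--         reading_set = {char for char in reading}
--         if segments in output_dict:
--             output_dict[segments].append(reading_set)
--         else:
--             output_dict[segments] = [reading_set]
--     return output_dict
-- ===== SOURCE B (Python) =====
-- def get_input_data_by_sector_count(input_data):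
--     """Group the readings by a count of its segments."""
--     lengths = dict.fromkeys(len(reading) for reading in input_data)
--     return {
--         length: [set(reading) for reading in input_data if len(reading) == length]
--         for length in lengths
--     }
-- ===== Notes on version B (the rewrite author's own statement) =====
-- stated objective: idiomatic
-- what changed: Replaced the single pass with per-element dict-membership branching and in-place appends by a dedup of the lengths (dict.fromkeys) followed by a dict comprehension that builds each bucket with a filtering pass per distinct length.
import Mathlib
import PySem

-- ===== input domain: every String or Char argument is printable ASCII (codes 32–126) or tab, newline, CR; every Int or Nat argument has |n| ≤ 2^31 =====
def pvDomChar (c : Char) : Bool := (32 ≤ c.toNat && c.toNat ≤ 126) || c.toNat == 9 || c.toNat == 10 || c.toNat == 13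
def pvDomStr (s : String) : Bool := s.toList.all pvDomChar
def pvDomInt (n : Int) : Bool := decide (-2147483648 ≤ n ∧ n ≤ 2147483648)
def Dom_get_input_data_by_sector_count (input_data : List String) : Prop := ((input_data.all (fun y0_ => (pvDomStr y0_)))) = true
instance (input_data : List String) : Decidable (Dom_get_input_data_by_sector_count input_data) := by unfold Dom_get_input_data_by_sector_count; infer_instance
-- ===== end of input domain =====

-- B replaces A's single pass with per-element dict-membership branching by a dedup of the
-- lengths followed by a dict comprehension building each bucket with a filter pass (idiomatic).

-- {char for char in reading} : a set of the 1-char strings, first occurrences in order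
def pvCharSet (reading : String) : List String :=
  PySem.Set.ofList (reading.toList.map (fun c => String.singleton c))

-- ===== PORT A =====
def get_input_data_by_sector_count (input_data : List String) : List (Int × List (List String)) :=
  (input_data.foldl
    (fun output_dict reading =>
      let segments : Int := PySem.Str.len reading
      let reading_set : List String := pvCharSet reading
      if output_dict.contains segments then
        output_dict.modify segments [] (fun l => l ++ [reading_set])
      else
        output_dict.insert segments [reading_set])
    (PySem.Dict.empty : PySem.Dict Int (List (List String)))).items

-- ===== PORT B =====
def get_input_data_by_sector_count_alt (input_data : List String) : List (Int × List (List String)) :=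
  let lengths : List Int := PySem.List.dedup (input_data.map (fun reading => PySem.Str.len reading))
  lengths.map (fun length =>
    (length,
     (input_data.filter (fun reading => PySem.Str.len reading == length)).map pvCharSet))

-- ===== PRECONDITION & SPEC =====
def Spec_get_input_data_by_sector_count (input_data : List String) (out : List (Int × List (List String))) : Prop := out = get_input_data_by_sector_count_alt input_data
instance (input_data : List String) (out : List (Int × List (List String))) : Decidable (Spec_get_input_data_by_sector_count input_data out) := by unfold Spec_get_input_data_by_sector_count; infer_instance

-- ===== CLAIM (what is proved, stated in full; the proofs are below) =====
def Claim_equal_get_input_data_by_sector_count : Prop := ∀ (input_data : List String), Dom_get_input_data_by_sector_count input_data → Spec_get_input_data_by_sector_count input_data (get_input_data_by_sector_count input_data)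

-- ===== LEMMAS AND PROOFS =====

-- A's branch (append if present, insert singleton otherwise) IS dict.modify with default []
theorem pvStep_eq_modify (d : PySem.Dict Int (List (List String))) (k : Int) (v : List String) :
    (if d.contains k then d.modify k [] (fun l => l ++ [v]) else d.insert k [v])
      = d.modify k [] (fun l => l ++ [v]) := by
  by_cases h : d.contains k
  · simp [h]
  · simp only [h, if_neg, Bool.false_eq_true, not_false_eq_true]
    simp only [PySem.Dict.modify]
    rw [PySem.Dict.getD_of_not_contains d [] (by simpa using h)]
    rfl

theorem get_input_data_by_sector_count_spec : Claim_equal_get_input_data_by_sector_count := by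
  intro input_data _
  unfold Spec_get_input_data_by_sector_count
  unfold get_input_data_by_sector_count get_input_data_by_sector_count_alt
  simp only []
  have hstep :
      (fun (output_dict : PySem.Dict Int (List (List String))) (reading : String) =>
        if output_dict.contains (PySem.Str.len reading) then
          output_dict.modify (PySem.Str.len reading) [] (fun l => l ++ [pvCharSet reading])
        else
          output_dict.insert (PySem.Str.len reading) [pvCharSet reading])
      = (fun (output_dict : PySem.Dict Int (List (List String))) (reading : String) =>
          output_dict.modify (PySem.Str.len reading) [] (fun l => l ++ [pvCharSet reading])) := by
    funext d r
    exact pvStep_eq_modify d (PySem.Str.len r) (pvCharSet r)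
  rw [hstep]
  set D := input_data.foldl
      (fun (output_dict : PySem.Dict Int (List (List String))) (reading : String) =>
        output_dict.modify (PySem.Str.len reading) [] (fun l => l ++ [pvCharSet reading]))
      PySem.Dict.empty with hD
  have hnodup : D.keys.Nodup := by
    rw [hD]
    exact PySem.Dict.nodup_keys_foldl_modify_key input_data (fun r => PySem.Str.len r) []
      (fun _ r l => l ++ [pvCharSet r]) PySem.Dict.empty (by simp)
  have hkeys : D.keys = PySem.List.dedup (input_data.map (fun r => PySem.Str.len r)) := by
    rw [hD]
    rw [PySem.Dict.keys_foldl_modify_key input_data (fun r => PySem.Str.len r) []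
      (fun _ r l => l ++ [pvCharSet r]) PySem.Dict.empty]
    simp [PySem.Set.update, PySem.List.dedup_eq_ofList, PySem.Set.ofList_eq_foldl,
      PySem.Dict.keys_empty]
  have hgetD : ∀ L : Int, D.getD L [] =
      (input_data.filter (fun r => PySem.Str.len r == L)).map pvCharSet := by
    intro L
    have hfm : D = (input_data.map (fun r => (PySem.Str.len r, pvCharSet r))).foldl
        (fun d p => d.modify p.1 [] (fun l => l ++ [p.2])) PySem.Dict.empty := by
      rw [hD, List.foldl_map]
    rw [hfm, PySem.Dict.getD_foldl_modify_append]
    simp [List.filter_map, List.map_map, Function.comp_def]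
  rw [PySem.Dict.items_eq_map_keys D hnodup []]
  rw [hkeys]
  exact List.map_congr_left (fun L _ => by rw [hgetD L])

-- ===== VERDICT (by name: the statement is the Claim_ definition above) =====
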